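-- pv_equiv track=rewrite | github.com/Kyeonghyeon-Park/Incentive_design-BO-with_successor_features | networks_ssd.py | make_layer_dims
-- ===== SOURCE A (Python) =====
-- def make_layer_dims(observation_size, action_size, feature_size, hidden_dims, mode='actor'):
--     """
--     Make the list of layer dimensions.
--     Each element is the dimension of layers ([input_dim, output_dim]).
--     Unlike previous implementation (taxi example), action is added into second layer.
--     In addition, the dimension of mean_action is assumed to be same as the dimension of action.
--
--     Parameters
--     ----------
--     observation_size: int
--     action_size: int
--     feature_size: int
--     hidden_dims: List
--         List of hidden layers' size.
--     mode: str
--         'actor' or 'critic' or 'psi'.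
--
--     Returns
--     -------
--     layer_dims: list
--         List of list
--         Each element is the dimension of layers ([input_dim, output_dim]).
--     """
--     layer_dims = []
--     if mode == 'actor':
--         for i in range(len(hidden_dims)):
--             if i == 0:
--                 layer_dim = [observation_size, hidden_dims[i]]
--             else:
--                 layer_dim = [hidden_dims[i - 1], hidden_dims[i]]
--             layer_dims.append(layer_dim)
--         layer_dim = [hidden_dims[-1], action_size]
--         layer_dims.append(layer_dim)
--     elif mode == 'critic':
--         for i in range(len(hidden_dims)):
--             if i == 0:
--                 layer_dim = [observation_size, hidden_dims[i]]
--             elif i == 1: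
--                 layer_dim = [hidden_dims[i - 1] + action_size, hidden_dims[i]]
--             else:
--                 layer_dim = [hidden_dims[i - 1], hidden_dims[i]]
--             layer_dims.append(layer_dim)
--         layer_dim = [hidden_dims[-1], action_size]
--         layer_dims.append(layer_dim)
--     elif mode == 'psi':
--         for i in range(len(hidden_dims)):
--             if i == 0:
--                 layer_dim = [observation_size, hidden_dims[i]]
--             elif i == 1:
--                 layer_dim = [hidden_dims[i - 1] + action_size, hidden_dims[i]]
--             else:
--                 layer_dim = [hidden_dims[i - 1], hidden_dims[i]]
--             layer_dims.append(layer_dim)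
--         layer_dim = [hidden_dims[-1], action_size * feature_size]
--         layer_dims.append(layer_dim)
--     else:
--         raise ValueError
--     return layer_dims
-- ===== SOURCE B (Python) =====
-- def make_layer_dims(observation_size, action_size, feature_size, hidden_dims, mode='actor'):
--     if mode == 'actor':
--         final_out = action_size
--     elif mode == 'critic':
--         final_out = action_size
--     elif mode == 'psi':
--         final_out = action_size * feature_size
--     else:
--         raise ValueError
--     inputs = [observation_size] + list(hidden_dims)
--     if mode != 'actor' and len(hidden_dims) >= 2:
--         inputs[1] += action_size
--     outputs = list(hidden_dims) + [final_out]
--     return [[i, o] for i, o in zip(inputs, outputs)]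
-- ===== Notes on version B (the rewrite author's own statement) =====
-- stated objective: simpler
-- what changed: Replaces A's three near-duplicate index loops with branch ladders by building the input-dims and output-dims lists once and zipping them into pairs.
-- crash fix: On a valid mode with empty hidden_dims A raises IndexError at hidden_dims[-1]; B returns the single layer [[observation_size, final_out]]. — e.g. on make_layer_dims(3, 2, 4, [], "psi"): A raises IndexError, B returns [[3, 8]]
import Mathlib
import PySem

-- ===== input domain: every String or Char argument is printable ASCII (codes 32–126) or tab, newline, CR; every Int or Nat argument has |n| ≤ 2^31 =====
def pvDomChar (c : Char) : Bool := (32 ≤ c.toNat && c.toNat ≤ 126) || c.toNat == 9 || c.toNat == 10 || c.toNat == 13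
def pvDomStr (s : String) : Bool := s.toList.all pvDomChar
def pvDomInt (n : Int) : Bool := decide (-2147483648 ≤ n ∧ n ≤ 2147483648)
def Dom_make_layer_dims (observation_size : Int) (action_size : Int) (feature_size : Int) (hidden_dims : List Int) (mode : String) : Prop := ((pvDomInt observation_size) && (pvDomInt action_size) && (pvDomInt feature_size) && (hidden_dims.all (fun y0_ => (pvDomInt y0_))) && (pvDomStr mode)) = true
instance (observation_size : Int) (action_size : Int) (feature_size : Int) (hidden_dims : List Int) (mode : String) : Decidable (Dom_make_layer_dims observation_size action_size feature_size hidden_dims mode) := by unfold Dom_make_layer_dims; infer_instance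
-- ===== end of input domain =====

-- B replaces A's three near-identical index loops by zipping an input-dims list with an
-- output-dims list (objective: simpler). Return-value equivalence only; neither mutates inputs.

-- ===== PORT A =====
def make_layer_dims (observation_size : Int) (action_size : Int) (feature_size : Int) (hidden_dims : List Int) (mode : String) : List (List Int) :=
  if mode == "actor" then
    ((PySem.List.pyRange 0 (hidden_dims.length : Int) 1).foldl (fun layer_dims i =>
      layer_dims ++ [if i == 0 then [observation_size, PySem.List.pyGetD hidden_dims i 0]
                     else [PySem.List.pyGetD hidden_dims (i - 1) 0, PySem.List.pyGetD hidden_dims i 0]]) [])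
    ++ [[PySem.List.pyGetD hidden_dims (-1) 0, action_size]]
  else if mode == "critic" then
    ((PySem.List.pyRange 0 (hidden_dims.length : Int) 1).foldl (fun layer_dims i =>
      layer_dims ++ [if i == 0 then [observation_size, PySem.List.pyGetD hidden_dims i 0]
                     else if i == 1 then [PySem.List.pyGetD hidden_dims (i - 1) 0 + action_size, PySem.List.pyGetD hidden_dims i 0]
                     else [PySem.List.pyGetD hidden_dims (i - 1) 0, PySem.List.pyGetD hidden_dims i 0]]) [])
    ++ [[PySem.List.pyGetD hidden_dims (-1) 0, action_size]]
  else if mode == "psi" then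
    ((PySem.List.pyRange 0 (hidden_dims.length : Int) 1).foldl (fun layer_dims i =>
      layer_dims ++ [if i == 0 then [observation_size, PySem.List.pyGetD hidden_dims i 0]
                     else if i == 1 then [PySem.List.pyGetD hidden_dims (i - 1) 0 + action_size, PySem.List.pyGetD hidden_dims i 0]
                     else [PySem.List.pyGetD hidden_dims (i - 1) 0, PySem.List.pyGetD hidden_dims i 0]]) [])
    ++ [[PySem.List.pyGetD hidden_dims (-1) 0, action_size * feature_size]]
  else []  -- raise ValueError: excluded by Pre_

-- ===== PORT B =====
def make_layer_dims_alt (observation_size : Int) (action_size : Int) (feature_size : Int) (hidden_dims : List Int) (mode : String) : List (List Int) :=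
  let final_out : Int :=
    if mode == "actor" then action_size
    else if mode == "critic" then action_size
    else if mode == "psi" then action_size * feature_size
    else 0  -- raise ValueError: excluded by Pre_
  let inputs := observation_size :: hidden_dims
  let inputs :=
    if mode != "actor" && decide (2 ≤ hidden_dims.length) then
      match inputs with
      | a :: b :: rest => a :: (b + action_size) :: rest
      | l => l
    else inputs
  let outputs := hidden_dims ++ [final_out]
  List.zipWith (fun i o => [i, o]) inputs outputs

-- ===== PRECONDITION & SPEC =====
-- Pre_ excludes exactly where A raises: an unknown mode (ValueError) and empty hidden_dims (IndexError at hidden_dims[-1]).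
def Pre_make_layer_dims (observation_size : Int) (action_size : Int) (feature_size : Int) (hidden_dims : List Int) (mode : String) : Prop :=
  (mode = "actor" ∨ mode = "critic" ∨ mode = "psi") ∧ hidden_dims ≠ []
instance (observation_size : Int) (action_size : Int) (feature_size : Int) (hidden_dims : List Int) (mode : String) : Decidable (Pre_make_layer_dims observation_size action_size feature_size hidden_dims mode) := by unfold Pre_make_layer_dims; infer_instance
def pvWitness_make_layer_dims : Int × Int × Int × List Int × String := (3, 2, 4, [5, 6], "critic")

-- On valid-mode inputs with empty hidden_dims A raises IndexError; B returns the single layer [[observation_size, final_out]].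
def Raises_make_layer_dims (observation_size : Int) (action_size : Int) (feature_size : Int) (hidden_dims : List Int) (mode : String) : Prop :=
  (mode = "actor" ∨ mode = "critic" ∨ mode = "psi") ∧ hidden_dims = []
instance (observation_size : Int) (action_size : Int) (feature_size : Int) (hidden_dims : List Int) (mode : String) : Decidable (Raises_make_layer_dims observation_size action_size feature_size hidden_dims mode) := by unfold Raises_make_layer_dims; infer_instance
def pvRaiseWitness_make_layer_dims : Int × Int × Int × List Int × String := (3, 2, 4, [], "psi")
def pvRaiseWitnessOut_make_layer_dims : List (List Int) := [[3, 8]]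

def Spec_make_layer_dims (observation_size : Int) (action_size : Int) (feature_size : Int) (hidden_dims : List Int) (mode : String) (out : List (List Int)) : Prop := out = make_layer_dims_alt observation_size action_size feature_size hidden_dims mode
instance (observation_size : Int) (action_size : Int) (feature_size : Int) (hidden_dims : List Int) (mode : String) (out : List (List Int)) : Decidable (Spec_make_layer_dims observation_size action_size feature_size hidden_dims mode out) := by unfold Spec_make_layer_dims; infer_instance

-- ===== CLAIM (what is proved, stated in full; the proofs are below) =====
def Claim_equal_make_layer_dims : Prop := ∀ (observation_size : Int) (action_size : Int) (feature_size : Int) (hidden_dims : List Int) (mode : String), Dom_make_layer_dims observation_size action_size feature_size hidden_dims mode → Pre_make_layer_dims observation_size action_size feature_size hidden_dims mode → Spec_make_layer_dims observation_size action_size feature_size hidden_dims mode (make_layer_dims observation_size action_size feature_size hidden_dims mode)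
def Claim_raises_make_layer_dims : Prop := (∀ (observation_size : Int) (action_size : Int) (feature_size : Int) (hidden_dims : List Int) (mode : String), Dom_make_layer_dims observation_size action_size feature_size hidden_dims mode → Raises_make_layer_dims observation_size action_size feature_size hidden_dims mode → ¬ Pre_make_layer_dims observation_size action_size feature_size hidden_dims mode) ∧ (Dom_make_layer_dims (pvRaiseWitness_make_layer_dims.1) (pvRaiseWitness_make_layer_dims.2.1) (pvRaiseWitness_make_layer_dims.2.2.1) (pvRaiseWitness_make_layer_dims.2.2.2.1) (pvRaiseWitness_make_layer_dims.2.2.2.2) ∧ Raises_make_layer_dims (pvRaiseWitness_make_layer_dims.1) (pvRaiseWitness_make_layer_dims.2.1) (pvRaiseWitness_make_layer_dims.2.2.1) (pvRaiseWitness_make_layer_dims.2.2.2.1) (pvRaiseWitness_make_layer_dims.2.2.2.2) ∧ make_layer_dims_alt (pvRaiseWitness_make_layer_dims.1) (pvRaiseWitness_make_layer_dims.2.1) (pvRaiseWitness_make_layer_dims.2.2.1) (pvRaiseWitness_make_layer_dims.2.2.2.1) (pvRaiseWitness_make_layer_dims.2.2.2.2) = pvRaiseWitnessOut_make_layer_d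ims)

-- ===== LEMMAS AND PROOFS =====

theorem zipWith_pair_eq_map_range (xs ys : List Int) (h : xs.length = ys.length) :
    List.zipWith (fun i o => [i, o]) xs ys
      = (List.range xs.length).map (fun k => [xs.getD k 0, ys.getD k 0]) := by
  induction xs generalizing ys with
  | nil => simp
  | cons x xs ih =>
    cases ys with
    | nil => simp at h
    | cons y ys =>
      simp [List.range_succ_eq_map, List.map_map, Function.comp_def,
        ih ys (by simpa using h)]

theorem loop_eq_zip (obs act fin : Int) (hd : List Int) (bump : Bool) (hhd : hd ≠ []) :
    ((PySem.List.pyRange 0 (hd.length : Int) 1).foldl (fun acc i =>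
      acc ++ [if i == 0 then [obs, PySem.List.pyGetD hd i 0]
              else if bump && i == 1 then [PySem.List.pyGetD hd (i - 1) 0 + act, PySem.List.pyGetD hd i 0]
              else [PySem.List.pyGetD hd (i - 1) 0, PySem.List.pyGetD hd i 0]]) [])
    ++ [[PySem.List.pyGetD hd (-1) 0, fin]]
    = List.zipWith (fun i o => [i, o])
        (if bump && decide (2 ≤ hd.length) then
          match obs :: hd with
          | a :: b :: rest => a :: (b + act) :: rest
          | l => l
        else obs :: hd)
        (hd ++ [fin]) := by
  have hlen : hd.length - 1 < hd.length := by
    cases hd with | nil => exact absurd rfl hhd | cons a t => simp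
  have hlast : PySem.List.pyGetD hd (-1) 0 = hd.getD (hd.length - 1) 0 := by
    rw [PySem.List.pyGetD_neg_one hd 0 hhd, List.getLast_eq_getElem, List.getD_eq_getElem _ _ hlen]
  set ins : List Int :=
    (if bump && decide (2 ≤ hd.length) then
      match obs :: hd with
      | a :: b :: rest => a :: (b + act) :: rest
      | l => l
    else obs :: hd) with hins
  have hinslen : ins.length = hd.length + 1 := by
    rw [hins]; split
    · match hd with
      | b :: rest => simp
    · simp
  rw [zipWith_pair_eq_map_range ins (hd ++ [fin]) (by simp [hinslen]),
    PySem.List.foldl_append_singleton_eq_map, PySem.List.pyRange_zero_nat, List.map_map,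
    List.nil_append, hinslen, List.range_succ, List.map_append]
  refine congrArg₂ _ ?_ ?_
  · refine List.map_congr_left (fun k hk => ?_)
    have hk' : k < hd.length := List.mem_range.mp hk
    have houts : (hd ++ [fin]).getD k 0 = hd.getD k 0 := by
      rw [List.getD_eq_getElem _ _ (by simp; omega), List.getD_eq_getElem _ _ hk',
        List.getElem_append_left hk']
    simp only [Function.comp_def, houts]
    by_cases hb : (bump && decide (2 ≤ hd.length)) = true
    · rw [hins]
      simp only [hb, if_pos]
      match hd, hhd, hb, hk' with
      | [b], _, hb, _ => simp at hb
      | h0 :: h1 :: rest, _, _, hk' =>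
        have hbump : bump = true := by revert hb; cases bump <;> simp
        match k with
        | 0 => simp [PySem.List.pyGetD_natCast, PySem.List.pyGetD_zero_cons]
        | 1 => norm_num [hbump, PySem.List.pyGetD_natCast, PySem.List.pyGetD_ofNat', PySem.List.pyGetD_zero_cons]
        | (m + 2) =>
          have n0 : (((m : Nat) + 2 : Int) == 0) = false := by simp; omega
          have n1 : (((m : Nat) + 2 : Int) == 1) = false := by simp; omega
          rw [show ((m + 2 : Nat) : Int) = ((m : Nat) + 2 : Int) by push_cast; ring, n0, n1]
          simp only [hbump, Bool.true_and, Bool.false_eq_true, if_false]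
          rw [show ((m : Nat) + 2 : Int) - 1 = ((m + 1 : Nat) : Int) by push_cast; ring,
            show ((m : Nat) + 2 : Int) = ((m + 2 : Nat) : Int) by push_cast; ring,
            PySem.List.pyGetD_natCast, PySem.List.pyGetD_natCast]
          simp [List.getD_eq_getElem?_getD]
    · rw [hins]
      simp only [hb, if_neg, Bool.false_eq_true, not_false_eq_true]
      match k with
      | 0 => simp [PySem.List.pyGetD_zero, List.getD_eq_getElem?_getD]
      | (m + 1) =>
        have n0 : (((m : Nat) + 1 : Int) == 0) = false := by simp; omega
        have hnb : (bump && (((m : Nat) + 1 : Int) == 1)) = false := by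
          rcases eq_or_ne bump false with h | h
          · simp [h]
          · have h' : bump = true := by revert h; cases bump <;> simp
            exfalso; apply hb; simp [h']; omega
        rw [show ((m + 1 : Nat) : Int) = ((m : Nat) + 1 : Int) by push_cast; ring, n0, hnb]
        simp only [Bool.false_eq_true, if_false]
        rw [show ((m : Nat) + 1 : Int) - 1 = ((m : Nat) : Int) by push_cast; ring,
          PySem.List.pyGetD_natCast,
          show ((m : Nat) + 1 : Int) = ((m + 1 : Nat) : Int) by push_cast; ring,
          PySem.List.pyGetD_natCast]
        simp [List.getD_eq_getElem?_getD]
  · -- the final appended layer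
    have houts : (hd ++ [fin]).getD hd.length 0 = fin := by
      rw [List.getD_eq_getElem _ _ (by simp), List.getElem_append_right (by omega)]
      simp
    have hins' : ins.getD hd.length 0 = hd.getD (hd.length - 1) 0 := by
      rw [hins]; split
      · match hd, hhd with
        | h0 :: h1 :: rest, _ => simp [List.getD_cons_succ]
        | [h0], _ =>
          rename_i hcond
          simp at hcond
      · match hd, hhd with
        | h0 :: t, _ =>
          simp [List.getD_cons_succ]
          try rfl
    simp only [List.map_cons, List.map_nil]
    rw [hlast, houts, hins']

theorem make_layer_dims_spec : Claim_equal_make_layer_dims := by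
  intro obs act feat hd mode _ hpre
  unfold Spec_make_layer_dims make_layer_dims make_layer_dims_alt
  rcases hpre with ⟨hm, hhd⟩
  rcases hm with h | h | h <;> subst h <;>
    simp only [beq_self_eq_true, if_pos, String.reduceBEq, Bool.false_eq_true, if_false,
      if_true, bne_self_eq_false, bne_iff_ne, ne_eq, String.reduceEq, not_false_eq_true,
      decide_true, Bool.true_and, Bool.false_and]
  · -- actor: A's body has no i==1 branch; it is the bump = false instance
    have h := loop_eq_zip obs act act hd false hhd
    simp only [Bool.false_and, Bool.false_eq_true, if_false] at h
    exact h
  · exact loop_eq_zip obs act act hd true hhd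
  · exact loop_eq_zip obs act (act * feat) hd true hhd

@[simp] theorem make_layer_dims_raises : Claim_raises_make_layer_dims := by
  unfold Claim_raises_make_layer_dims
  refine ⟨?_, by decide⟩
  intro o a f hd m _ hr hp
  exact hp.2 hr.2
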